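-- pv_equiv track=rewrite | github.com/ArchitWagle/tsec_code_cell | solution2_1.py | keyb
-- ===== SOURCE A (Python) =====
-- def keyb(s):
--     sum =0
--     for i in range(len(s)-1):
--         if(s[i]==s[i+1]):
--             sum = sum
--         else:
--             sum = sum+ abs(ord(s[i]) - ord(s[i+1]))-1
--     return(sum)
-- ===== SOURCE B (Python) =====
-- def keyb(s):
--     # Phase 1: run-length-compress the string (keep one char per run of equals).
--     runs = []
--     for c in s:
--         if not runs or runs[-1] != c:
--             runs.append(c)
--     # Phase 2: adjacent run heads always differ, so each pair contributes |diff|-1.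
--     return sum(abs(ord(a) - ord(b)) - 1 for a, b in zip(runs, runs[1:]))
-- ===== Notes on version B (the rewrite author's own statement) =====
-- stated objective: alternative
-- what changed: B first run-length-compresses the string (dropping equal-adjacent repeats), then sums |diff|-1 unconditionally over adjacent run heads, eliminating A's per-pair equality branch.
import Mathlib
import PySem

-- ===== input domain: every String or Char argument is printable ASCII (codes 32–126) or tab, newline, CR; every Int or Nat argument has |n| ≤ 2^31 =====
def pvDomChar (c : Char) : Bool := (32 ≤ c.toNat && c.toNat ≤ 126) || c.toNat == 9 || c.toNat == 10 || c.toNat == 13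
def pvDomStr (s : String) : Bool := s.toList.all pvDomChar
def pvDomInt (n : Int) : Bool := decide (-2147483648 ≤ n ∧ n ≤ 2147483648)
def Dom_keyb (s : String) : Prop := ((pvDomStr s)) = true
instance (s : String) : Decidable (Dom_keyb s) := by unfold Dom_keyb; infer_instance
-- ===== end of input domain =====

-- B run-length-compresses the string first, then sums |diff|-1 over adjacent run heads
-- without A's equality branch (alternative decomposition, same cost).

-- ===== PORT A =====
def keyb (s : String) : Int :=
  let cs := s.toList
  (PySem.List.pyRange 0 ((cs.length : Int) - 1) 1).foldl
    (fun sum i =>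
      if PySem.List.pyGetD cs i ' ' = PySem.List.pyGetD cs (i + 1) ' ' then sum
      else sum + |((PySem.List.pyGetD cs i ' ').toNat : Int)
                  - ((PySem.List.pyGetD cs (i + 1) ' ').toNat : Int)| - 1)
    0

-- ===== PORT B =====
def keyb_alt (s : String) : Int :=
  let cs := s.toList
  -- Phase 1: run-length compression, as in Source B ('if not runs or runs[-1] != c: runs.append(c)')
  let runs := cs.foldl (fun rs c => if rs = [] ∨ rs.getLast? ≠ some c then rs ++ [c] else rs) []
  -- Phase 2: unconditional sum over adjacent run heads
  ((runs.zip runs.tail).map (fun p => |((p.1.toNat : Int)) - (p.2.toNat : Int)| - 1)).sum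

-- ===== PRECONDITION & SPEC =====
def Spec_keyb (s : String) (out : Int) : Prop := out = keyb_alt s
instance (s : String) (out : Int) : Decidable (Spec_keyb s out) := by unfold Spec_keyb; infer_instance

-- ===== CLAIM (what is proved, stated in full; the proofs are below) =====
def Claim_equal_keyb : Prop := ∀ (s : String), Dom_keyb s → Spec_keyb s (keyb s)

-- ===== LEMMAS AND PROOFS =====

-- A's conditional weight on a pair
def wA (p : Char × Char) : Int :=
  if p.1 = p.2 then 0 else |((p.1.toNat : Int)) - (p.2.toNat : Int)| - 1

-- B's unconditional weight on a pair
def wB (p : Char × Char) : Int := |((p.1.toNat : Int)) - (p.2.toNat : Int)| - 1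

-- sum of B's weights over adjacent pairs of a list
def pairSumB (r : List Char) : Int := ((r.zip r.tail).map wB).sum

-- the run-compression of t given that l is the last char already kept
def dedupFrom (l : Char) : List Char → List Char
  | [] => []
  | c :: t => if c = l then dedupFrom l t else c :: dedupFrom c t

-- A's loop body as a fold over the pair list equals the sum of wA
theorem foldA_eq_sum (pairs : List (Char × Char)) (acc : Int) :
    pairs.foldl
      (fun sum p => if p.1 = p.2 then sum
        else sum + |((p.1.toNat : Int)) - (p.2.toNat : Int)| - 1) acc
    = acc + (pairs.map wA).sum := by
  induction pairs generalizing acc with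
  | nil => simp
  | cons p ps ih =>
    by_cases h : p.1 = p.2
    · simp [List.foldl_cons, h, ih, wA]
    · simp [List.foldl_cons, h, ih, wA]
      ring

-- A's indexed pyRange fold equals the fold over the zipped pair list
theorem keyb_fold_pairs (cs : List Char) :
    (PySem.List.pyRange 0 ((cs.length : Int) - 1) 1).foldl
      (fun sum i =>
        if PySem.List.pyGetD cs i ' ' = PySem.List.pyGetD cs (i + 1) ' ' then sum
        else sum + |((PySem.List.pyGetD cs i ' ').toNat : Int)
                    - ((PySem.List.pyGetD cs (i + 1) ' ').toNat : Int)| - 1) 0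
    = (cs.zip cs.tail).foldl
        (fun sum p => if p.1 = p.2 then sum
          else sum + |((p.1.toNat : Int)) - (p.2.toNat : Int)| - 1) 0 := by
  cases cs with
  | nil => simp [PySem.List.pyRange_one_eq_nil]
  | cons c cs' =>
    set pairs := (c :: cs').zip (c :: cs').tail with hp
    have hlen : ((pairs.length : Int)) = ((c :: cs').length : Int) - 1 := by
      simp [hp, List.length_zip]
    rw [← hlen]
    rw [← PySem.List.foldl_pyRange_zero_pyGetD' pairs (' ', ' ')
      (fun sum p => if p.1 = p.2 then sum
        else sum + |((p.1.toNat : Int)) - (p.2.toNat : Int)| - 1) 0]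
    apply PySem.List.foldl_congr_mem
    intro acc i hi
    rw [PySem.List.mem_pyRange_one] at hi
    obtain ⟨h0, h1⟩ := hi
    have hiN : i.toNat < pairs.length := by omega
    have hgp : PySem.List.pyGetD pairs i (' ', ' ') = pairs[i.toNat] :=
      PySem.List.pyGetD_eq_getElem pairs (' ', ' ') h0 (by omega)
    have h1' : i.toNat < (c :: cs').length := by
      simp [hp, List.length_zip] at hiN ⊢; omega
    have h2' : i.toNat + 1 < (c :: cs').length := by
      simp [hp, List.length_zip] at hiN ⊢; omega
    have hg1 : PySem.List.pyGetD (c :: cs') i ' ' = (c :: cs')[i.toNat] :=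
      PySem.List.pyGetD_eq_getElem (c :: cs') ' ' h0 (by omega)
    have hg2 : PySem.List.pyGetD (c :: cs') (i + 1) ' ' = (c :: cs')[i.toNat + 1] := by
      have := PySem.List.pyGetD_eq_getElem (c :: cs') (i := i + 1) ' ' (by omega) (by omega)
      rw [this]; congr 1; omega
    have hfst : pairs[i.toNat].1 = (c :: cs')[i.toNat] := by
      simp [hp, List.getElem_zip]
    have hsnd : pairs[i.toNat].2 = (c :: cs')[i.toNat + 1] := by
      simp [hp, List.getElem_zip]
    rw [hgp, hg1, hg2, ← hfst, ← hsnd]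

-- core identity: A's pair sum over c::t equals B's pair sum over the run compression
theorem sum_wA_eq_pairSumB_dedup (t : List Char) (c : Char) :
    ((((c :: t).zip t).map wA).sum) = pairSumB (c :: dedupFrom c t) := by
  induction t generalizing c with
  | nil => simp [pairSumB, dedupFrom]
  | cons d t ih =>
    by_cases h : d = c
    · subst h
      simp only [List.zip_cons_cons, List.map_cons, List.sum_cons, dedupFrom]
      have hw : wA (d, d) = 0 := by simp [wA]
      rw [hw, zero_add, ih]
      simp
    · have hAB : wA (c, d) = wB (c, d) := by simp [wA, wB, Ne.symm h]
      simp only [List.zip_cons_cons, List.map_cons, List.sum_cons, dedupFrom, if_neg h]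
      rw [ih d, hAB]
      simp [pairSumB]

-- B's foldl run builder, with a nonempty accumulator ending in l, appends dedupFrom l
theorem runs_foldl_eq (t : List Char) (as : List Char) (l : Char) :
    t.foldl (fun rs c => if rs = [] ∨ rs.getLast? ≠ some c then rs ++ [c] else rs) (as ++ [l])
    = as ++ [l] ++ dedupFrom l t := by
  induction t generalizing as l with
  | nil => simp [dedupFrom]
  | cons c t ih =>
    have hne : as ++ [l] ≠ [] := by simp
    have hlast : (as ++ [l]).getLast? = some l := by simp
    by_cases h : c = l
    · subst h
      simp [List.foldl_cons, hlast, dedupFrom, ih]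
    · have h' : l ≠ c := Ne.symm h
      simp only [List.foldl_cons, hlast, dedupFrom, h]
      rw [if_pos (show as ++ [l] = [] ∨ (some l : Option Char) ≠ some c from
        Or.inr (by simpa using h'))]
      have h2 := ih (as ++ [l]) c
      simp at h2 ⊢
      simp [h2]

-- the run list of c::t is c :: dedupFrom c t
theorem runs_cons (c : Char) (t : List Char) :
    (c :: t).foldl (fun rs c => if rs = [] ∨ rs.getLast? ≠ some c then rs ++ [c] else rs) []
    = c :: dedupFrom c t := by
  simp only [List.foldl_cons, List.nil_append]
  have := runs_foldl_eq t [] c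
  simpa using this

-- ===== VERDICT (by name: the statement is the Claim_ definition above) =====
theorem keyb_spec : Claim_equal_keyb := by
  intro s _
  unfold Spec_keyb keyb keyb_alt
  simp only []
  rw [keyb_fold_pairs, foldA_eq_sum, zero_add]
  cases h : s.toList with
  | nil => simp
  | cons c t =>
    rw [runs_cons]
    have ht : (c :: t).tail = t := rfl
    rw [ht, sum_wA_eq_pairSumB_dedup]
    rfl
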